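-- pv_equiv track=rewrite | github.com/duartega/cs415Project1 | Project1.py | euclids_algo
-- ===== SOURCE A (Python) =====
-- def euclids_algo(m, n, count, done):
--
--     # arr.append(euclids_algo(sCount, i, 0, rec))
--     # Create the base case for m and n, NOT gcd
--     if (int(n) == 0 or int (m) == 0):
--         return 0
--     else:
--         gcd = int(m) % int(n) # gets the remainder
--         count += 1
--
--         # Sets the base case for the GCD
--         if (gcd == 0):
--             return count
--         else:
--             if (done == int(10)):
--                 return euclids_algo(n, gcd, count, int(10))
--             else:
--                 return euclids_algo(n, gcd,  count, int(11))
-- ===== SOURCE B (Python) =====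
-- def euclids_algo(m, n, count, done):
--     # Iterative: the vestigial `done` parameter never affects the result.
--     if int(n) == 0 or int(m) == 0:
--         return 0
--     while True:
--         gcd = int(m) % int(n)
--         count += 1
--         if gcd == 0:
--             return count
--         m, n = n, gcd
-- ===== Notes on version B (the rewrite author's own statement) =====
-- stated objective: simpler
-- what changed: Tail recursion with the vestigial done-parameter branching is replaced by a plain while-loop that swaps (m, n) and drops done entirely.
import Mathlib
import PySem

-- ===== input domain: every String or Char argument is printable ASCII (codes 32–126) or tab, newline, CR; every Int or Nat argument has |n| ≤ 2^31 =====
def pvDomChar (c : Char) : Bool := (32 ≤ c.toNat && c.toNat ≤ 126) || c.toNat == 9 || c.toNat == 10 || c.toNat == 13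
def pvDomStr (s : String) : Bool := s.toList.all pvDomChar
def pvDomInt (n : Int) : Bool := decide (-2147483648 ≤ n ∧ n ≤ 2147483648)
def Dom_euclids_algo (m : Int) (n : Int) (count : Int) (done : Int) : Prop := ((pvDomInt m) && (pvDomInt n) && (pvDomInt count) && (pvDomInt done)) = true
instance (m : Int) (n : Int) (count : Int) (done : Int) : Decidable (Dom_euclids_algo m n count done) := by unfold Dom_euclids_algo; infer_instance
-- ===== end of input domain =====

-- B replaces A's tail recursion (with its vestigial `done` branching) by a plain while-loop; same result, simpler.


-- |a % b| < |b| for Python's mod whenever b ≠ 0 (used by both ports for termination)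
theorem pvModNatAbsLt (a b : Int) (hb : b ≠ 0) : (PySem.Int.mod a b).natAbs < b.natAbs := by
  rcases lt_trichotomy b 0 with h | h | h
  · have := PySem.Int.mod_neg_bounds a h
    omega
  · exact absurd h hb
  · have h1 := PySem.Int.mod_nonneg a h
    have h2 := PySem.Int.mod_lt a h
    omega

-- ===== PORT A =====
def euclids_algo (m : Int) (n : Int) (count : Int) (done : Int) : Int :=
  if n = 0 ∨ m = 0 then 0
  else
    let gcd := PySem.Int.mod m n
    let count := count + 1
    if gcd = 0 then count
    else if done = 10 then euclids_algo n gcd count 10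
    else euclids_algo n gcd count 11
termination_by n.natAbs
decreasing_by
  · exact pvModNatAbsLt m n (by tauto)
  · exact pvModNatAbsLt m n (by tauto)

-- ===== PORT B =====
-- the body of Source B's `while True` loop; the swap `m, n = n, gcd` is the tail call
def euclidLoop (m : Int) (n : Int) (count : Int) : Int :=
  let gcd := PySem.Int.mod m n
  let count := count + 1
  if _h : gcd = 0 then count
  else euclidLoop n gcd count
termination_by (PySem.Int.mod m n).natAbs
decreasing_by
  exact pvModNatAbsLt n (PySem.Int.mod m n) _h

def euclids_algo_alt (m : Int) (n : Int) (count : Int) (done : Int) : Int :=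
  if n = 0 ∨ m = 0 then 0
  else euclidLoop m n count

-- ===== PRECONDITION & SPEC =====
def Spec_euclids_algo (m : Int) (n : Int) (count : Int) (done : Int) (out : Int) : Prop := out = euclids_algo_alt m n count done
instance (m : Int) (n : Int) (count : Int) (done : Int) (out : Int) : Decidable (Spec_euclids_algo m n count done out) := by unfold Spec_euclids_algo; infer_instance

-- ===== CLAIM (what is proved, stated in full; the proofs are below) =====
def Claim_equal_euclids_algo : Prop := ∀ (m : Int) (n : Int) (count : Int) (done : Int), Dom_euclids_algo m n count done → Spec_euclids_algo m n count done (euclids_algo m n count done)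

-- ===== LEMMAS AND PROOFS =====

theorem euclids_algo_eq_loop : ∀ (k : Nat) (m n count done : Int), n.natAbs = k → n ≠ 0 → m ≠ 0 →
    euclids_algo m n count done = euclidLoop m n count := by
  intro k
  induction k using Nat.strong_induction_on with
  | _ k ih =>
    intro m n count done hk hn hm
    rw [euclids_algo, euclidLoop]
    have hguard : ¬ (n = 0 ∨ m = 0) := by tauto
    simp only [hguard, if_false]
    by_cases hg : PySem.Int.mod m n = 0
    · simp [hg]
    · have hlt : (PySem.Int.mod m n).natAbs < k := hk ▸ pvModNatAbsLt m n hn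
      by_cases hd : done = 10 <;>
        simp only [hg, hd, if_true, if_false, dif_neg, not_false_iff] <;>
        exact ih _ hlt n (PySem.Int.mod m n) (count + 1) _ rfl hg hn

-- ===== VERDICT (by name: the statement is the Claim_ definition above) =====
theorem euclids_algo_spec : Claim_equal_euclids_algo := by
  intro m n count done _
  unfold Spec_euclids_algo euclids_algo_alt
  by_cases h : n = 0 ∨ m = 0
  · rw [euclids_algo]
    simp [h]
  · rw [if_neg h]
    exact euclids_algo_eq_loop n.natAbs m n count done rfl (by tauto) (by tauto)
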